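-- pv_equiv track=rewrite | github.com/MKuranowski/pyroutelib3 | pyroutelib3.py | _flatternAndRemoveDupes
-- ===== SOURCE A (Python) =====
-- def _flatternAndRemoveDupes(x):
--     result = []
--     prev = None
--     for subx in x:
--         for item in subx:
--             if item != prev:
--                 prev = item
--                 result.append(item)
--     return result
-- ===== SOURCE B (Python) =====
-- def _flatternAndRemoveDupes(x):
--     # Stage 1: deduplicate each sublist independently by comparing each
--     # element with its predecessor (zip against the shifted list).
--     # Stage 2: stitch the deduplicated pieces together, dropping the head
--     # of a piece when it repeats the tail of the output so far.
--     def dedup(s):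
--         return [a for a, b in zip(s, [None] + s) if a != b]
--
--     out = []
--     for piece in map(dedup, x):
--         if out and piece and piece[0] == out[-1]:
--             out += piece[1:]
--         else:
--             out += piece
--     return out
-- ===== Notes on version B (the rewrite author's own statement) =====
-- stated objective: alternative
-- what changed: Replaces A's fused nested loop with cross-sublist prev state by two stages: each sublist is deduplicated independently via a shifted-zip pairwise comparison, then the deduplicated pieces are stitched together by a merge pass that drops a piece's head when it equals the accumulated tail.
import Mathlib
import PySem

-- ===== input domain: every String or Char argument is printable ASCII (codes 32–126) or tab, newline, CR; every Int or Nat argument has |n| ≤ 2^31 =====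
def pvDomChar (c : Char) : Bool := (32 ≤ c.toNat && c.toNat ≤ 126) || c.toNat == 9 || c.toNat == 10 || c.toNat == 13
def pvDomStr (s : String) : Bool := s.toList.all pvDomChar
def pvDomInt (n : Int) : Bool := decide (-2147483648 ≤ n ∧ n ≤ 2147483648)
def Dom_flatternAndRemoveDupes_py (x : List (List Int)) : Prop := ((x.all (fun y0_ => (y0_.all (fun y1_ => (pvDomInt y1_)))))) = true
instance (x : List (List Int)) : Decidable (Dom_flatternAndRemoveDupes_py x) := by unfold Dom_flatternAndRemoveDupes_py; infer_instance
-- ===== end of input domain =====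

-- B deduplicates each sublist independently (shifted-zip pairwise comparison) and then
-- stitches the pieces with a junction-merging fold, instead of A's fused nested loop
-- with cross-sublist prev state (alternative decomposition, same cost).


-- ===== PORT A =====
-- literal port of A: nested loop over x, state = (result, prev); 'item != prev' with prev : Option Int
def flatternAndRemoveDupes_py (x : List (List Int)) : List Int :=
  (x.foldl
    (fun st subx =>
      subx.foldl
        (fun st item =>
          if some item ≠ st.2 then (st.1 ++ [item], some item) else st)
        st)
    (([] : List Int), (none : Option Int))).1

-- ===== PORT B =====
-- dedup(s) = [a for a, b in zip(s, [None] + s) if a != b]  (None ↦ Option.none)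
def pvDedup (s : List Int) : List Int :=
  ((s.zip ((none : Option Int) :: s.map some)).filter (fun ab => some ab.1 ≠ ab.2)).map Prod.fst

-- the merge step of B's loop: drop the piece's head when it repeats the output's tail
def pvMerge (out p : List Int) : List Int :=
  match out.getLast?, p with
  | some l, b :: t => if b = l then out ++ t else out ++ (b :: t)
  | _, _ => out ++ p

def flatternAndRemoveDupes_py_alt (x : List (List Int)) : List Int :=
  (x.map pvDedup).foldl pvMerge []

-- ===== PRECONDITION & SPEC =====
def Spec_flatternAndRemoveDupes_py (x : List (List Int)) (out : List Int) : Prop := out = flatternAndRemoveDupes_py_alt x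
instance (x : List (List Int)) (out : List Int) : Decidable (Spec_flatternAndRemoveDupes_py x out) := by unfold Spec_flatternAndRemoveDupes_py; infer_instance

-- ===== CLAIM (what is proved, stated in full; the proofs are below) =====
def Claim_equal_flatternAndRemoveDupes_py : Prop := ∀ (x : List (List Int)), Dom_flatternAndRemoveDupes_py x → Spec_flatternAndRemoveDupes_py x (flatternAndRemoveDupes_py x)

-- ===== LEMMAS AND PROOFS =====

-- the inner-step function of A's loop
def pvStepA (st : List Int × Option Int) (item : Int) : List Int × Option Int :=
  if some item ≠ st.2 then (st.1 ++ [item], some item) else st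

-- what A's loop appends from state 'prev' over the remaining flat stream
def pvAux : Option Int → List Int → List Int
  | _, [] => []
  | prev, a :: t => if some a ≠ prev then a :: pvAux (some a) t else pvAux prev t

-- the prev state after streaming s from state p
def pvNext (p : Option Int) (s : List Int) : Option Int := s.getLast?.or p

-- A's nested foldl is the foldl over the flattened stream
lemma pvFoldl_flat (x : List (List Int)) (st : List Int × Option Int) :
    x.foldl (fun st subx => subx.foldl pvStepA st) st = (x.flatMap id).foldl pvStepA st := by
  induction x generalizing st with
  | nil => simp
  | cons h t ih => simp [List.flatMap_cons, List.foldl_append, ih]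

-- characterisation of the flat foldl via pvAux
lemma pvFoldl_aux (l : List Int) (res : List Int) (prev : Option Int) :
    (l.foldl pvStepA (res, prev)).1 = res ++ pvAux prev l := by
  induction l generalizing res prev with
  | nil => simp [pvAux]
  | cons a t ih =>
    by_cases h : some a ≠ prev
    · simp [pvStepA, pvAux, h, ih]
    · simp only [ne_eq, not_not] at h
      simp [pvStepA, pvAux, ← h, ih]

-- restarting past a seen value = dropping a repeated head
lemma pvAux_some (a : Int) (s : List Int) :
    pvAux (some a) s =
      match pvAux none s with
      | [] => []
      | b :: r => if b = a then r else b :: r := by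
  cases s with
  | nil => simp [pvAux]
  | cons b t =>
    by_cases h : b = a
    · subst h; simp [pvAux]
    · simp [pvAux, h]

lemma pvAux_none_nil (s : List Int) : pvAux none s = [] ↔ s = [] := by
  cases s with
  | nil => simp [pvAux]
  | cons a t => simp [pvAux]

-- B's dedup computes pvAux (generalized over the shift head)
lemma pvDedup_aux (s : List Int) (p : Option Int) :
    ((s.zip (p :: s.map some)).filter (fun ab => some ab.1 ≠ ab.2)).map Prod.fst
      = pvAux p s := by
  induction s generalizing p with
  | nil => simp [pvAux]
  | cons a t ih =>
    by_cases h : some a ≠ p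
    · simp only [List.map_cons, List.zip_cons_cons, List.filter_cons, pvAux, h,
        ne_eq, not_false_eq_true, if_pos, decide_not, List.map_cons]
      simpa using ih (some a)
    · simp only [ne_eq, not_not] at h
      simp only [pvAux, ← h, List.map_cons, List.zip_cons_cons, List.filter_cons]
      simpa using ih (some a)

lemma pvDedup_eq (s : List Int) : pvDedup s = pvAux none s := pvDedup_aux s none

-- merging a deduplicated piece = continuing the stream from the output's last element
lemma pvMerge_aux (A s : List Int) :
    pvMerge A (pvAux none s) = A ++ pvAux A.getLast? s := by
  cases hA : A.getLast? with
  | none =>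
    cases hq : pvAux none s <;> simp [pvMerge, hA]
  | some l =>
    cases hq : pvAux none s with
    | nil =>
      have : s = [] := (pvAux_none_nil s).mp hq
      subst this
      simp [pvMerge, hA, pvAux]
    | cons b r =>
      rw [pvAux_some l s, hq]
      by_cases h : b = l <;> simp [pvMerge, hA, h]

lemma pvNext_cons (p : Option Int) (a : Int) (l : List Int) :
    pvNext p (a :: l) = pvNext (some a) l := by
  cases l with
  | nil => simp [pvNext]
  | cons b t =>
    rw [pvNext, pvNext, List.getLast?_cons_cons]
    cases h : (b :: t).getLast? with
    | none => exact absurd (List.getLast?_eq_none_iff.mp h) (by simp)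
    | some y => simp

-- the prev state after streaming the collapsed output equals the one after the stream
lemma pvNext_aux (p : Option Int) (s : List Int) :
    pvNext p (pvAux p s) = pvNext p s := by
  induction s generalizing p with
  | nil => simp [pvAux]
  | cons a t ih =>
    by_cases h : some a ≠ p
    · simp [pvAux, h, pvNext_cons, ih]
    · simp only [ne_eq, not_not] at h
      simp [pvAux, ← h, pvNext_cons, ih]

-- streams compose: collapse (s ++ r) = collapse s ++ collapse-from-the-new-state r
lemma pvAux_append (s : List Int) (p : Option Int) (r : List Int) :
    pvAux p (s ++ r) = pvAux p s ++ pvAux (pvNext p s) r := by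
  induction s generalizing p with
  | nil => simp [pvAux, pvNext]
  | cons a t ih =>
    by_cases h : some a ≠ p
    · simp [pvAux, h, pvNext_cons, ih]
    · simp only [ne_eq, not_not] at h
      simp [pvAux, ← h, pvNext_cons, ih]

-- main invariant of B's merge fold
lemma pvFold_merge (x : List (List Int)) (A : List Int) :
    (x.map pvDedup).foldl pvMerge A = A ++ pvAux A.getLast? (x.flatMap id) := by
  induction x generalizing A with
  | nil => simp [pvAux]
  | cons s t ih =>
    simp only [List.map_cons, List.foldl_cons, List.flatMap_cons, id]
    rw [pvDedup_eq, pvMerge_aux, ih]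
    have hlast : (A ++ pvAux A.getLast? s).getLast? = pvNext A.getLast? s := by
      rw [List.getLast?_append]
      exact pvNext_aux A.getLast? s
    rw [hlast, List.append_assoc, ← pvAux_append]

-- ===== VERDICT (by name: the statement is the Claim_ definition above) =====
theorem flatternAndRemoveDupes_py_spec : Claim_equal_flatternAndRemoveDupes_py := by
  intro x _
  show flatternAndRemoveDupes_py x = flatternAndRemoveDupes_py_alt x
  unfold flatternAndRemoveDupes_py flatternAndRemoveDupes_py_alt
  have : (fun (st : List Int × Option Int) item =>
      if some item ≠ st.2 then (st.1 ++ [item], some item) else st) = pvStepA := rfl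
  rw [this, pvFoldl_flat, pvFoldl_aux, pvFold_merge]
  simp
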